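-- pv_equiv track=rewrite | github.com/alreva/ai-assistant | whisper-streaming/server/utils.py | dedup_repeated_phrases
-- ===== SOURCE A (Python) =====
-- def dedup_repeated_phrases(text: str, max_repeats: int = 3) -> str:
--     """Remove repeated words/phrases caused by Whisper hallucination.
--
--     Scans text for any phrase (1-3 words) repeated more than max_repeats times
--     consecutively, and truncates at the first repetition.
--     """
--     words = text.split()
--     if len(words) <= max_repeats:
--         return text
--
--     for start in range(len(words)):
--         for phrase_len in range(1, min(4, (len(words) - start) // 2) + 1):
--             phrase = words[start:start + phrase_len]
--             count = 0
--             i = start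
--             while i + phrase_len <= len(words):
--                 if words[i:i + phrase_len] == phrase:
--                     count += 1
--                     i += phrase_len
--                 else:
--                     break
--             if count > max_repeats:
--                 return " ".join(words[:start + phrase_len])
--     return text
-- ===== SOURCE B (Python) =====
-- def dedup_repeated_phrases(text: str, max_repeats: int = 3) -> str:
--     """Truncate at the first phrase (1-4 words) repeated more than max_repeats
--     times consecutively.
--
--     Different decomposition: for each phrase length independently, find the
--     earliest start where the first max_repeats+1 consecutive blocks are all
--     identical (a closed-form check instead of a counting while-loop), then
--     pick the best candidate by (start, phrase_len).
--     """
--     words = text.split()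
--     n = len(words)
--     if n <= max_repeats:
--         return text
--     best = None  # (start, phrase_len)
--     for L in range(1, 5):
--         for s in range(n):
--             if s + 2 * L <= n:
--                 block = words[s:s + L]
--                 if all(words[s + j * L:s + (j + 1) * L] == block
--                        for j in range(max_repeats + 1)):
--                     if best is None or (s, L) < best:
--                         best = (s, L)
--                     break
--     if best is None:
--         return text
--     s, L = best
--     return " ".join(words[:s + L])
-- ===== Notes on version B (the rewrite author's own statement) =====
-- stated objective: alternative
-- what changed: B inverts the loop nesting: for each phrase length 1..4 independently it finds the earliest start whose first max_repeats+1 consecutive blocks are all identical (one closed-form all-blocks-equal check instead of A's counting while-loop), then picks the best candidate by (start, phrase_len); A scans starts outermost with an inner greedy repetition counter.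
import Mathlib
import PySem

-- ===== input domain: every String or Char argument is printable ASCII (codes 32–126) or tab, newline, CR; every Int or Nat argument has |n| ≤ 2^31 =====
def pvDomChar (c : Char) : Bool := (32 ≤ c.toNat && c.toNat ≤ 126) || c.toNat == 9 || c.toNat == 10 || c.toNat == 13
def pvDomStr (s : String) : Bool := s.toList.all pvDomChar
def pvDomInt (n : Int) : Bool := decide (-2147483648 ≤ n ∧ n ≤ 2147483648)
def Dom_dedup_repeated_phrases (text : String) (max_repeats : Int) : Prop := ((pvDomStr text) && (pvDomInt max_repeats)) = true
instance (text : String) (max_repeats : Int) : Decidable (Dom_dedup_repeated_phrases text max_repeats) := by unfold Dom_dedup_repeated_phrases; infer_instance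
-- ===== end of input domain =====

-- B replaces A's start-outermost scan with one first-hit search per phrase length
-- plus a lexicographic best-candidate choice (alternative decomposition, same cost).

-- ===== PORT A =====
-- the 'while i + phrase_len <= len(words): … count += 1' loop; fuel (words.length+1) only bounds
-- the iteration count, which never exceeds it since phrase_len ≥ 1
def pvACount (words phrase : List String) (L : Nat) : Nat → Nat → Nat → Nat
  | 0, _, count => count
  | fuel+1, i, count =>
    if i + L ≤ words.length then
      if PySem.List.slice words (some (i : Int)) (some ((i + L : Nat) : Int)) = phrase then
        pvACount words phrase L fuel (i + L) (count + 1)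
      else count
    else count

-- 'for phrase_len in range(1, min(4, (len(words)-start)//2) + 1): … return …'
def pvAInner (words : List String) (max_repeats : Int) (s : Nat) : List Nat → Option String
  | [] => none
  | L :: rest =>
    let phrase := PySem.List.slice words (some (s : Int)) (some ((s + L : Nat) : Int))
    let count := pvACount words phrase L (words.length + 1) s 0
    if max_repeats < (count : Int) then
      some (PySem.Str.join " " (PySem.List.slice words none (some ((s + L : Nat) : Int))))
    else pvAInner words max_repeats s rest

-- 'for start in range(len(words)): …'
def pvAOuter (words : List String) (max_repeats : Int) : List Nat → Option String
  | [] => none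
  | s :: rest =>
    match pvAInner words max_repeats s (List.range' 1 (min 4 ((words.length - s) / 2))) with
    | some r => some r
    | none => pvAOuter words max_repeats rest

def dedup_repeated_phrases (text : String) (max_repeats : Int) : String :=
  let words := PySem.Str.split₀ text
  if (words.length : Int) ≤ max_repeats then text
  else
    match pvAOuter words max_repeats (List.range words.length) with
    | some r => r
    | none => text

-- ===== PORT B =====
-- 'all(words[s+j*L : s+(j+1)*L] == block for j in range(max_repeats+1))'
def pvBCond (words : List String) (max_repeats : Int) (L s : Nat) : Bool :=
  let block := PySem.List.slice words (some (s : Int)) (some ((s + L : Nat) : Int))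
  (List.range (max_repeats + 1).toNat).all fun j =>
    PySem.List.slice words (some ((s + j * L : Nat) : Int)) (some ((s + (j + 1) * L : Nat) : Int)) = block

-- inner 'for s in range(n): … break' — first start that hits, for this L
def pvBFind (words : List String) (max_repeats : Int) (L : Nat) : List Nat → Option Nat
  | [] => none
  | s :: rest =>
    if s + 2 * L ≤ words.length then
      if pvBCond words max_repeats L s then some s
      else pvBFind words max_repeats L rest
    else pvBFind words max_repeats L rest

-- 'if best is None or (s, L) < best: best = (s, L)'
def pvBUpd (best : Option (Nat × Nat)) (s L : Nat) : Option (Nat × Nat) :=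
  match best with
  | none => some (s, L)
  | some b => if s < b.1 ∨ (s = b.1 ∧ L < b.2) then some (s, L) else some b

-- outer 'for L in range(1, 5): …'
def pvBLoop (words : List String) (max_repeats : Int) : List Nat → Option (Nat × Nat) → Option (Nat × Nat)
  | [], best => best
  | L :: rest, best =>
    match pvBFind words max_repeats L (List.range words.length) with
    | none => pvBLoop words max_repeats rest best
    | some s => pvBLoop words max_repeats rest (pvBUpd best s L)

def dedup_repeated_phrases_alt (text : String) (max_repeats : Int) : String :=
  let words := PySem.Str.split₀ text
  if (words.length : Int) ≤ max_repeats then text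
  else
    match pvBLoop words max_repeats (List.range' 1 4) none with
    | none => text
    | some (s, L) => PySem.Str.join " " (PySem.List.slice words none (some ((s + L : Nat) : Int)))

-- ===== PRECONDITION & SPEC =====
def Spec_dedup_repeated_phrases (text : String) (max_repeats : Int) (out : String) : Prop := out = dedup_repeated_phrases_alt text max_repeats
instance (text : String) (max_repeats : Int) (out : String) : Decidable (Spec_dedup_repeated_phrases text max_repeats out) := by unfold Spec_dedup_repeated_phrases; infer_instance

-- ===== CLAIM (what is proved, stated in full; the proofs are below) =====
def Claim_equal_dedup_repeated_phrases : Prop := ∀ (text : String) (max_repeats : Int), Dom_dedup_repeated_phrases text max_repeats → Spec_dedup_repeated_phrases text max_repeats (dedup_repeated_phrases text max_repeats)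

-- ===== LEMMAS AND PROOFS =====

theorem pvACount_acc (w p : List String) (L : Nat) :
    ∀ fuel i c, pvACount w p L fuel i c = c + pvACount w p L fuel i 0 := by
  intro fuel
  induction fuel with
  | zero => intro i c; simp [pvACount]
  | succ f ih =>
    intro i c
    simp only [pvACount]
    split
    · split
      · rw [ih (i+L) (c+1), ih (i+L) 1]; omega
      · omega
    · omega

theorem pvACount_ge (w phrase : List String) (L : Nat) :
    ∀ fuel i m, m ≤ pvACount w phrase L fuel i 0 →
      ∀ j < m, i + (j+1)*L ≤ w.length ∧ (w.drop (i + j*L)).take L = phrase := by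
  intro fuel
  induction fuel with
  | zero => intro i m hm j hj; simp [pvACount] at hm; omega
  | succ f ih =>
    intro i m hm j hj
    simp only [pvACount] at hm
    by_cases hg : i + L ≤ w.length
    · rw [if_pos hg] at hm
      by_cases he : PySem.List.slice w (some (i : Int)) (some ((i + L : Nat) : Int)) = phrase
      · rw [if_pos he, pvACount_acc] at hm
        rw [PySem.List.slice_natCast, Nat.add_sub_cancel_left] at he
        match j with
        | 0 => simpa using ⟨hg, he⟩
        | j'+1 =>
          have h2 := ih (i+L) (m-1) (by omega) j' (by omega)
          have e1 : (i+L) + (j'+1)*L = i + (j'+1+1)*L := by ring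
          have e2 : (i+L) + j'*L = i + (j'+1)*L := by ring
          rw [e1, e2] at h2
          exact h2
      · rw [if_neg he] at hm; omega
    · rw [if_neg hg] at hm; omega

theorem pvACount_ge' (w phrase : List String) (L : Nat) :
    ∀ m fuel i, m ≤ fuel →
      (∀ j < m, i + (j+1)*L ≤ w.length ∧ (w.drop (i + j*L)).take L = phrase) →
      m ≤ pvACount w phrase L fuel i 0 := by
  intro m
  induction m with
  | zero => intro fuel i _ _; omega
  | succ m' ih =>
    intro fuel i hf h
    match fuel, hf with
    | f+1, hf =>
      have h0 := h 0 (by omega)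
      simp only [pvACount]
      rw [if_pos (by simpa using h0.1)]
      rw [if_pos (by rw [PySem.List.slice_natCast, Nat.add_sub_cancel_left]; simpa using h0.2)]
      rw [pvACount_acc]
      have : m' ≤ pvACount w phrase L f (i+L) 0 := by
        apply ih f (i+L) (by omega)
        intro j hj
        have := h (j+1) (by omega)
        have e1 : i + (j+1+1)*L = (i+L) + (j+1)*L := by ring
        have e2 : i + (j+1)*L = (i+L) + j*L := by ring
        rw [e1, e2] at this
        exact this
      omega

theorem pvBlock_iff (w : List String) (L s j : Nat) (hL : 1 ≤ L)
    (hs : s + 2 * L ≤ w.length) :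
    ((w.drop (s + j*L)).take L = (w.drop s).take L) ↔
      (s + (j+1)*L ≤ w.length ∧ (w.drop (s + j*L)).take L = (w.drop s).take L) := by
  constructor
  · intro he
    refine ⟨?_, he⟩
    have hlen := congrArg List.length he
    simp only [List.length_take, List.length_drop] at hlen
    have hjl : (j+1)*L = j*L + L := by ring
    omega
  · exact fun h => h.2

theorem pvCount_iff (w : List String) (mr : Int) (L s : Nat) (hL : 1 ≤ L)
    (hs : s + 2 * L ≤ w.length) :
    (mr < (pvACount w (PySem.List.slice w (some (s : Int)) (some ((s + L : Nat) : Int))) L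
      (w.length + 1) s 0 : Int)) ↔ pvBCond w mr L s = true := by
  rw [PySem.List.slice_natCast, Nat.add_sub_cancel_left]
  set phrase := (w.drop s).take L with hphrase
  set cnt := pvACount w phrase L (w.length + 1) s 0 with hcnt
  set m := (mr + 1).toNat with hm
  have step1 : (mr < (cnt : Int)) ↔ m ≤ cnt := by omega
  have step2 : m ≤ cnt ↔ (∀ j < m, s + (j+1)*L ≤ w.length ∧ (w.drop (s + j*L)).take L = phrase) := by
    constructor
    · intro h; exact pvACount_ge w phrase L (w.length+1) s m h
    · intro h
      apply pvACount_ge' w phrase L m (w.length+1) s ?_ h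
      match m with
      | 0 => omega
      | m'+1 =>
        have := (h m' (by omega)).1
        have h1 : m'+1 ≤ (m'+1)*L := Nat.le_mul_of_pos_right _ (by omega)
        omega
  have step3 : (∀ j < m, s + (j+1)*L ≤ w.length ∧ (w.drop (s + j*L)).take L = phrase) ↔
      pvBCond w mr L s = true := by
    unfold pvBCond
    rw [List.all_eq_true]
    constructor
    · intro h x hx
      rw [List.mem_range] at hx
      have := (h x hx).2
      rw [PySem.List.slice_natCast, PySem.List.slice_natCast, Nat.add_sub_cancel_left]
      have e : s + (x+1)*L - (s + x*L) = L := by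
        have : (x+1)*L = x*L + L := by ring
        omega
      rw [e]
      simpa [hphrase] using this
    · intro h j hj
      have := h j (by rw [List.mem_range]; exact hj)
      rw [PySem.List.slice_natCast, PySem.List.slice_natCast, Nat.add_sub_cancel_left] at this
      have e : s + (j+1)*L - (s + j*L) = L := by
        have : (j+1)*L = j*L + L := by ring
        omega
      rw [e] at this
      simp only [decide_eq_true_eq] at this
      exact (pvBlock_iff w L s j hL hs).mp this
  rw [step1, step2, step3]

def pvC (w : List String) (mr : Int) (p : Nat × Nat) : Bool :=
  decide (p.1 + 2 * p.2 ≤ w.length) && pvBCond w mr p.2 p.1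

theorem pvAInner_spec (w : List String) (mr : Int) (s : Nat) :
    ∀ ls : List Nat, (∀ L ∈ ls, 1 ≤ L ∧ s + 2*L ≤ w.length) →
      pvAInner w mr s ls = (ls.find? (fun L => pvC w mr (s, L))).map
        (fun L => PySem.Str.join " " (PySem.List.slice w none (some ((s + L : Nat) : Int)))) := by
  intro ls
  induction ls with
  | nil => intro _; rfl
  | cons L rest ih =>
    intro h
    have hL := h L (by simp)
    have hcond : (mr < (pvACount w
        (PySem.List.slice w (some (s : Int)) (some ((s + L : Nat) : Int))) L
        (w.length + 1) s 0 : Int)) ↔ pvC w mr (s, L) = true := by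
      rw [pvCount_iff w mr L s hL.1 hL.2]
      simp [pvC, hL.2]
    simp only [pvAInner, List.find?]
    by_cases hc : pvC w mr (s, L) = true
    · rw [if_pos (hcond.mpr hc), hc]; rfl
    · rw [if_neg (fun hx => hc (hcond.mp hx))]
      rw [Bool.not_eq_true] at hc
      rw [hc]
      exact ih (fun L' hL' => h L' (by simp [hL']))

theorem pvAOuter_spec_gen (w : List String) (mr : Int) :
    ∀ ss : List Nat, (∀ s ∈ ss, s < w.length) →
      pvAOuter w mr ss =
        ((ss.flatMap fun s => (List.range' 1 4).map fun L => (s, L)).find? (pvC w mr)).map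
          (fun p => PySem.Str.join " " (PySem.List.slice w none (some ((p.1 + p.2 : Nat) : Int)))) := by
  intro ss
  induction ss with
  | nil => intro _; rfl
  | cons s rest ih =>
    intro h
    have hs : s < w.length := h s (by simp)
    -- inner list bound facts
    have hdom : ∀ L ∈ List.range' 1 (min 4 ((w.length - s) / 2)), 1 ≤ L ∧ s + 2*L ≤ w.length := by
      intro L hL
      rw [List.mem_range'_1] at hL
      have h2 : L ≤ (w.length - s) / 2 := by omega
      have h3 : 2 * L ≤ w.length - s := by omega
      omega
    -- prefix/suffix split of [1,2,3,4]
    have hsplit : List.range' 1 4 = List.range' 1 (min 4 ((w.length - s) / 2)) ++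
        List.range' (1 + min 4 ((w.length - s) / 2)) (4 - min 4 ((w.length - s) / 2)) := by
      rw [show (1 + min 4 ((w.length - s) / 2)) = 1 + 1 * min 4 ((w.length - s) / 2) by ring]
      rw [List.range'_append]
      congr 1
      omega
    have hsuf : (List.range' (1 + min 4 ((w.length - s) / 2)) (4 - min 4 ((w.length - s) / 2))).find?
        (fun L => pvC w mr (s, L)) = none := by
      rw [List.find?_eq_none]
      intro L hL
      rw [List.mem_range'_1] at hL
      have hgt : ¬ (s + 2*L ≤ w.length) := by
        have h4 : min 4 ((w.length - s) / 2) < L := by omega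
        have h5 : (w.length - s) / 2 < L ∨ 4 < L := by omega
        rcases h5 with h5 | h5
        · omega
        · omega
      simp [pvC, hgt]
    simp only [pvAOuter]
    rw [pvAInner_spec w mr s _ hdom]
    rw [List.flatMap_cons, List.find?_append, List.find?_map]
    have hpred : (pvC w mr ∘ fun L => (s, L)) = fun L => pvC w mr (s, L) := rfl
    rw [hpred]
    have hhead : (List.range' 1 4).find? (fun L => pvC w mr (s, L)) =
        (List.range' 1 (min 4 ((w.length - s) / 2))).find? (fun L => pvC w mr (s, L)) := by
      rw [hsplit, List.find?_append, hsuf, Option.or_none]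
    rw [hhead]
    cases hfp : (List.range' 1 (min 4 ((w.length - s) / 2))).find? (fun L => pvC w mr (s, L)) with
    | some L => simp
    | none =>
      simp only [Option.map_none, Option.none_or]
      exact ih (fun s' hs' => h s' (by simp [hs']))

def pvLexLt (p q : Nat × Nat) : Prop := p.1 < q.1 ∨ (p.1 = q.1 ∧ p.2 < q.2)

theorem pvBFind_spec (w : List String) (mr : Int) (L : Nat) :
    ∀ ss : List Nat, pvBFind w mr L ss = ss.find? (fun s => pvC w mr (s, L)) := by
  intro ss
  induction ss with
  | nil => rfl
  | cons s rest ih =>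
    simp only [pvBFind, List.find?, pvC]
    by_cases hg : s + 2*L ≤ w.length
    · rw [if_pos hg]
      by_cases hc : pvBCond w mr L s
      · simp [hg, hc]
      · simp [hg, hc, ih, pvC]
    · rw [if_neg hg]
      simp [hg, ih, pvC]

theorem pv_find?_least {α : Type} (P : α → Bool) (R : α → α → Prop) :
    ∀ l : List α, l.Pairwise R →
      ((∀ b, l.find? P = some b → b ∈ l ∧ P b = true ∧ ∀ x ∈ l, P x = true → x = b ∨ R b x) ∧
       (l.find? P = none → ∀ x ∈ l, P x = false)) := by
  intro l
  induction l with
  | nil => intro _; simp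
  | cons a t ih =>
    intro hp
    rw [List.pairwise_cons] at hp
    obtain ⟨h1, h2⟩ := hp
    have iht := ih h2
    constructor
    · intro b hb
      simp only [List.find?] at hb
      by_cases ha : P a
      · rw [ha] at hb
        simp only [Option.some.injEq] at hb
        subst hb
        refine ⟨by simp, ha, ?_⟩
        intro x hx _
        rcases List.mem_cons.mp hx with h | h
        · exact Or.inl h
        · exact Or.inr (h1 x h)
      · rw [Bool.not_eq_true] at ha
        rw [ha] at hb
        obtain ⟨hmem, hPb, hmin⟩ := iht.1 b hb
        refine ⟨List.mem_cons.mpr (Or.inr hmem), hPb, ?_⟩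
        intro x hx hPx
        rcases List.mem_cons.mp hx with h | h
        · subst h; rw [hPx] at ha; exact absurd ha (by simp)
        · exact hmin x h hPx
    · intro hn x hx
      simp only [List.find?] at hn
      by_cases ha : P a
      · rw [ha] at hn; exact absurd hn (by simp)
      · rw [Bool.not_eq_true] at ha
        rw [ha] at hn
        rcases List.mem_cons.mp hx with h | h
        · subst h; exact ha
        · exact iht.2 hn x h

theorem pvGrid_mem (w : List String) (p : Nat × Nat) :
    p ∈ ((List.range w.length).flatMap fun s => (List.range' 1 4).map fun L => (s, L)) ↔
      p.1 < w.length ∧ 1 ≤ p.2 ∧ p.2 < 5 := by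
  simp only [List.mem_flatMap, List.mem_map, List.mem_range, List.mem_range'_1]
  constructor
  · rintro ⟨s, hs, L, hL, rfl⟩
    exact ⟨hs, by omega⟩
  · rintro ⟨h1, h2, h3⟩
    exact ⟨p.1, h1, p.2, by omega, rfl⟩

theorem pvGrid_pairwise_gen :
    ∀ ss : List Nat, ss.Pairwise (· < ·) →
      ((ss.flatMap fun s => (List.range' 1 4).map fun L => (s, L)).Pairwise pvLexLt) := by
  intro ss
  induction ss with
  | nil => intro _; simp
  | cons s rest ih =>
    intro hp
    rw [List.pairwise_cons] at hp
    obtain ⟨h1, h2⟩ := hp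
    rw [List.flatMap_cons, List.pairwise_append]
    refine ⟨?_, ih h2, ?_⟩
    · rw [List.pairwise_map]
      have : (List.range' 1 4).Pairwise (· < ·) := by decide
      exact this.imp (fun h => Or.inr ⟨rfl, h⟩)
    · intro x hx y hy
      rw [List.mem_map] at hx
      rw [List.mem_flatMap] at hy
      obtain ⟨L, _, rfl⟩ := hx
      obtain ⟨s', hs', hy'⟩ := hy
      rw [List.mem_map] at hy'
      obtain ⟨L', _, rfl⟩ := hy'
      exact Or.inl (h1 s' hs')

-- invariant for B's fold: o is the lex-least candidate among phrase lengths allowed by U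

def pvGood (w : List String) (mr : Int) (U : Nat → Prop) (o : Option (Nat × Nat)) : Prop :=
  (o = none → ∀ q : Nat × Nat, q.1 < w.length → pvC w mr q = true → ¬ U q.2) ∧
  (∀ p, o = some p → (p.1 < w.length ∧ pvC w mr p = true ∧ U p.2) ∧
     ∀ q : Nat × Nat, q.1 < w.length → pvC w mr q = true → U q.2 → ¬ pvLexLt q p)

theorem pvGood_congr (w : List String) (mr : Int) (U V : Nat → Prop)
    (h : ∀ L, U L ↔ V L) (o : Option (Nat × Nat)) (hg : pvGood w mr U o) : pvGood w mr V o := by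
  obtain ⟨g1, g2⟩ := hg
  constructor
  · intro hn q hq1 hq2 hv
    exact g1 hn q hq1 hq2 ((h q.2).mpr hv)
  · intro p hp
    obtain ⟨⟨a, b, c⟩, d⟩ := g2 p hp
    exact ⟨⟨a, b, (h p.2).mp c⟩, fun q hq1 hq2 hv => d q hq1 hq2 ((h q.2).mpr hv)⟩

theorem pvBLoop_good (w : List String) (mr : Int) :
    ∀ (Ls : List Nat) (best : Option (Nat × Nat)) (U : Nat → Prop),
      pvGood w mr U best →
      pvGood w mr (fun L => U L ∨ L ∈ Ls) (pvBLoop w mr Ls best) := by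
  intro Ls
  induction Ls with
  | nil =>
    intro best U hg
    exact pvGood_congr w mr U _ (by simp) best hg
  | cons L rest ih =>
    intro best U hg
    simp only [pvBLoop]
    rw [pvBFind_spec]
    have hleast := pv_find?_least (fun s => pvC w mr (s, L)) (· < ·) (List.range w.length)
      List.pairwise_lt_range
    cases hfind : (List.range w.length).find? (fun s => pvC w mr (s, L)) with
    | none =>
      have hnone : ∀ s, s < w.length → pvC w mr (s, L) = false := by
        intro s hs
        exact hleast.2 hfind s (List.mem_range.mpr hs)
      have hinv := ih best U hg
      obtain ⟨g1, g2⟩ := hinv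
      constructor
      · rintro hn ⟨q1, q2⟩ hq1 hq2 hv
        simp only [List.mem_cons] at hv
        rcases hv with h | rfl | h
        · exact g1 hn (q1, q2) hq1 hq2 (Or.inl h)
        · rw [hnone q1 hq1] at hq2; exact absurd hq2 (by simp)
        · exact g1 hn (q1, q2) hq1 hq2 (Or.inr h)
      · intro p hp
        obtain ⟨⟨a, b, c⟩, d⟩ := g2 p hp
        refine ⟨⟨a, b, by simp only [List.mem_cons]; tauto⟩, ?_⟩
        rintro ⟨q1, q2⟩ hq1 hq2 hv
        simp only [List.mem_cons] at hv
        rcases hv with h | rfl | h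
        · exact d (q1, q2) hq1 hq2 (Or.inl h)
        · rw [hnone q1 hq1] at hq2; exact absurd hq2 (by simp)
        · exact d (q1, q2) hq1 hq2 (Or.inr h)
    | some s0 =>
      obtain ⟨hs0mem, hs0P, hs0min⟩ := hleast.1 s0 hfind
      rw [List.mem_range] at hs0mem
      have hs0min' : ∀ q1, q1 < w.length → pvC w mr (q1, L) = true → q1 = s0 ∨ s0 < q1 := by
        intro q1 hq1 hP
        exact hs0min q1 (List.mem_range.mpr hq1) hP
      have hgood' : pvGood w mr (fun x => U x ∨ x = L) (pvBUpd best s0 L) := by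
        obtain ⟨g1, g2⟩ := hg
        cases best with
        | none =>
          constructor
          · intro hn; exact absurd hn (by simp [pvBUpd])
          · intro p hp
            simp only [pvBUpd, Option.some.injEq] at hp
            subst hp
            refine ⟨⟨hs0mem, hs0P, Or.inr rfl⟩, ?_⟩
            rintro ⟨q1, q2⟩ hq1 hq2 hv
            rcases hv with h | rfl
            · exact absurd h (g1 rfl (q1, q2) hq1 hq2)
            · have := hs0min' q1 hq1 hq2
              simp only [pvLexLt]
              omega
        | some b =>
          constructor
          · intro hn
            simp only [pvBUpd] at hn
            split at hn <;> exact absurd hn (by simp)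
          · intro p hp
            obtain ⟨⟨a1, a2, a3⟩, d⟩ := g2 b rfl
            simp only [pvBUpd] at hp
            split at hp
            case isTrue hifc =>
              simp only [Option.some.injEq] at hp
              subst hp
              refine ⟨⟨hs0mem, hs0P, Or.inr rfl⟩, ?_⟩
              rintro ⟨q1, q2⟩ hq1 hq2 hv
              rcases hv with h | rfl
              · have hqb := d (q1, q2) hq1 hq2 h
                simp only [pvLexLt] at hqb ⊢
                omega
              · have := hs0min' q1 hq1 hq2
                simp only [pvLexLt]
                omega
            case isFalse hifc =>
              simp only [Option.some.injEq] at hp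
              subst hp
              refine ⟨⟨a1, a2, Or.inl a3⟩, ?_⟩
              rintro ⟨q1, q2⟩ hq1 hq2 hv
              rcases hv with h | rfl
              · exact d (q1, q2) hq1 hq2 h
              · have := hs0min' q1 hq1 hq2
                simp only [pvLexLt]
                omega
      have := ih (pvBUpd best s0 L) _ hgood'
      apply pvGood_congr w mr _ _ ?_ _ this
      intro L'
      simp only [List.mem_cons]
      tauto

theorem pvBLoop_spec (w : List String) (mr : Int) :
    pvBLoop w mr (List.range' 1 4) none =
      ((List.range w.length).flatMap fun s => (List.range' 1 4).map fun L => (s, L)).find?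
        (pvC w mr) := by
  have hgood0 : pvGood w mr (fun _ => False) none :=
    ⟨fun _ _ _ _ h => h, fun p hp => by cases hp⟩
  have hres := pvBLoop_good w mr (List.range' 1 4) none _ hgood0
  have hA := pv_find?_least (pvC w mr) pvLexLt
    ((List.range w.length).flatMap fun s => (List.range' 1 4).map fun L => (s, L))
    (pvGrid_pairwise_gen (List.range w.length) List.pairwise_lt_range)
  cases hb : pvBLoop w mr (List.range' 1 4) none with
  | none =>
    cases hf : ((List.range w.length).flatMap fun s => (List.range' 1 4).map fun L => (s, L)).find?
        (pvC w mr) with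
    | none => rfl
    | some p =>
      obtain ⟨hmem, hP, _⟩ := hA.1 p hf
      rw [pvGrid_mem] at hmem
      have hL4 : p.2 ∈ List.range' 1 4 := by rw [List.mem_range'_1]; omega
      exact absurd (Or.inr hL4) (hres.1 hb p hmem.1 hP)
  | some p =>
    obtain ⟨⟨hp1, hp2, hp3⟩, hmin⟩ := hres.2 p hb
    have hp3' : p.2 ∈ List.range' 1 4 := by tauto
    rw [List.mem_range'_1] at hp3'
    have hpG : p ∈ ((List.range w.length).flatMap fun s => (List.range' 1 4).map fun L => (s, L)) := by
      rw [pvGrid_mem]; omega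
    cases hf : ((List.range w.length).flatMap fun s => (List.range' 1 4).map fun L => (s, L)).find?
        (pvC w mr) with
    | none =>
      rw [hA.2 hf p hpG] at hp2
      exact absurd hp2 (by simp)
    | some b =>
      obtain ⟨hbmem, hbP, hbmin⟩ := hA.1 b hf
      rw [pvGrid_mem] at hbmem
      have hbL : b.2 ∈ List.range' 1 4 := by rw [List.mem_range'_1]; omega
      have h1 : ¬ pvLexLt b p := hmin b hbmem.1 hbP (Or.inr hbL)
      rcases hbmin p hpG hp2 with h | h
      · rw [h]
      · exact absurd h h1

-- ===== VERDICT (by name: the statement is the Claim_ definition above) =====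
theorem dedup_repeated_phrases_spec : Claim_equal_dedup_repeated_phrases := by
  intro text mr _
  unfold Spec_dedup_repeated_phrases dedup_repeated_phrases dedup_repeated_phrases_alt
  by_cases hg : ((PySem.Str.split₀ text).length : Int) ≤ mr
  · rw [if_pos hg, if_pos hg]
  · rw [if_neg hg, if_neg hg]
    rw [pvAOuter_spec_gen (PySem.Str.split₀ text) mr (List.range (PySem.Str.split₀ text).length)
      (fun s hs => List.mem_range.mp hs)]
    rw [← pvBLoop_spec]
    cases pvBLoop (PySem.Str.split₀ text) mr (List.range' 1 4) none with
    | none => rfl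
    | some p => cases p; rfl
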